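-- pv_equiv track=rewrite | github.com/matt-j-harvey/Widefield_Preprocessing | Classify_Trials.py | get_visual_onsets_in_stable_odour_trials
-- ===== SOURCE A (Python) =====
-- def get_visual_onsets_in_stable_odour_trials(visual_1_onsets, visual_2_onsets, stable_odour_1_onsets, stable_odour_2_onsets):
--
--     following_window_size = 5000
--
--     combined_stable_odour_onsets = stable_odour_1_onsets + stable_odour_2_onsets
--     vis_1_onsets_in_stable_odour_trials = []
--     vis_2_onsets_in_stable_odour_trials = []
--
--     #Get Vis 1 onsets in stable odour trials
--     for visual_onset in visual_1_onsets:
--         following_window = visual_onset + following_window_size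
--
--         for odour_onset in combined_stable_odour_onsets:
--             if odour_onset > visual_onset and odour_onset <= following_window:
--                 vis_1_onsets_in_stable_odour_trials.append(visual_onset)
--
--     # Get Vis 2 onsets in stable odour trials
--     for visual_onset in visual_2_onsets:
--         following_window = visual_onset + following_window_size
--
--         for odour_onset in combined_stable_odour_onsets:
--             if odour_onset > visual_onset and odour_onset <= following_window:
--                 vis_2_onsets_in_stable_odour_trials.append(visual_onset)
--
--     return vis_1_onsets_in_stable_odour_trials, vis_2_onsets_in_stable_odour_trials
-- ===== SOURCE B (Python) =====
-- def get_visual_onsets_in_stable_odour_trials(visual_1_onsets, visual_2_onsets, stable_odour_1_onsets, stable_odour_2_onsets):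
--
--     following_window_size = 5000
--
--     # sort the combined odour onsets ONCE, then count the onsets in each
--     # window (visual_onset, visual_onset + 5000] by binary search
--     sorted_odour_onsets = sorted(stable_odour_1_onsets + stable_odour_2_onsets)
--
--     def _bisect_right(a, x):
--         # standard bisect_right (hand-written: this module imports nothing)
--         lo, hi = 0, len(a)
--         while lo < hi:
--             mid = (lo + hi) // 2
--             if x < a[mid]:
--                 hi = mid
--             else:
--                 lo = mid + 1
--         return lo
--
--     def _select(visual_onsets):
--         selected = []
--         for visual_onset in visual_onsets:
--             n = (_bisect_right(sorted_odour_onsets, visual_onset + following_window_size)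
--                  - _bisect_right(sorted_odour_onsets, visual_onset))
--             selected.extend([visual_onset] * n)
--         return selected
--
--     return _select(visual_1_onsets), _select(visual_2_onsets)
-- ===== Notes on version B (the rewrite author's own statement) =====
-- stated objective: faster
-- what changed: B sorts the combined odour onsets once and, for each visual onset, counts the odour onsets in its (v, v+5000] window by binary search (hand-written bisect_right) and appends the onset that many times, replacing A's inner linear scan per visual onset.
import Mathlib
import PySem

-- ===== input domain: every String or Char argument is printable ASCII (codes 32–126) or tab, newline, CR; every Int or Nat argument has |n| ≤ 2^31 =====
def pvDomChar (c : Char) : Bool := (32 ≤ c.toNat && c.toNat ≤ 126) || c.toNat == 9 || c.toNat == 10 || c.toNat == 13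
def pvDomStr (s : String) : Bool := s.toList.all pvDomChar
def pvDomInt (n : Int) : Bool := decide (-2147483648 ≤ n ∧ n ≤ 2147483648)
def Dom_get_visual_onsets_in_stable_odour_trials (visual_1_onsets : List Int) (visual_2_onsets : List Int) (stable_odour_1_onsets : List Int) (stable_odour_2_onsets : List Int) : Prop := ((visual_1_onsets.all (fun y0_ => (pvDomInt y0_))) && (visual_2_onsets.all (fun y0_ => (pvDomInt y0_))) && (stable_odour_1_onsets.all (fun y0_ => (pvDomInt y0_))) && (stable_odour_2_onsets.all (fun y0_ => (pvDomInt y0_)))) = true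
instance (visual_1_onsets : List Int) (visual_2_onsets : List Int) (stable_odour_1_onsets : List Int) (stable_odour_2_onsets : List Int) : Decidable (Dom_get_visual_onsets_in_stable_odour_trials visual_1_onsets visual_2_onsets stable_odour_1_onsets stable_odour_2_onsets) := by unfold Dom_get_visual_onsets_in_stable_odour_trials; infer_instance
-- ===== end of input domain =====

-- B replaces A's inner linear scan over all odour onsets by one sort of the combined
-- odour onsets plus two binary searches per visual onset (objective: faster).

-- ===== PORT A =====
def get_visual_onsets_in_stable_odour_trials (visual_1_onsets : List Int) (visual_2_onsets : List Int) (stable_odour_1_onsets : List Int) (stable_odour_2_onsets : List Int) : List Int × List Int :=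
  let following_window_size : Int := 5000
  let combined_stable_odour_onsets := stable_odour_1_onsets ++ stable_odour_2_onsets
  -- Get Vis 1 onsets in stable odour trials
  let vis_1_onsets_in_stable_odour_trials :=
    visual_1_onsets.foldl (fun acc visual_onset =>
      let following_window := visual_onset + following_window_size
      combined_stable_odour_onsets.foldl (fun acc2 odour_onset =>
        if odour_onset > visual_onset ∧ odour_onset ≤ following_window then acc2 ++ [visual_onset]
        else acc2) acc) []
  -- Get Vis 2 onsets in stable odour trials
  let vis_2_onsets_in_stable_odour_trials :=
    visual_2_onsets.foldl (fun acc visual_onset =>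
      let following_window := visual_onset + following_window_size
      combined_stable_odour_onsets.foldl (fun acc2 odour_onset =>
        if odour_onset > visual_onset ∧ odour_onset ≤ following_window then acc2 ++ [visual_onset]
        else acc2) acc) []
  (vis_1_onsets_in_stable_odour_trials, vis_2_onsets_in_stable_odour_trials)

-- ===== PORT B =====
-- Source B's hand-written _bisect_right is exactly bisect.bisect_right (same lo/hi binary
-- search), so it is ported as the prelude's primitive PySem.List.bisectRight.
def pvSelect (sorted_odour_onsets : List Int) (visual_onsets : List Int) : List Int :=
  visual_onsets.foldl (fun selected visual_onset =>
    let n := PySem.List.bisectRight sorted_odour_onsets (visual_onset + 5000)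
             - PySem.List.bisectRight sorted_odour_onsets visual_onset
    selected ++ List.replicate n visual_onset) []

def get_visual_onsets_in_stable_odour_trials_alt (visual_1_onsets : List Int) (visual_2_onsets : List Int) (stable_odour_1_onsets : List Int) (stable_odour_2_onsets : List Int) : List Int × List Int :=
  let sorted_odour_onsets := PySem.List.sorted (stable_odour_1_onsets ++ stable_odour_2_onsets) (fun x => x)
  (pvSelect sorted_odour_onsets visual_1_onsets, pvSelect sorted_odour_onsets visual_2_onsets)

-- ===== PRECONDITION & SPEC =====
def Spec_get_visual_onsets_in_stable_odour_trials (visual_1_onsets : List Int) (visual_2_onsets : List Int) (stable_odour_1_onsets : List Int) (stable_odour_2_onsets : List Int) (out : List Int × List Int) : Prop := out = get_visual_onsets_in_stable_odour_trials_alt visual_1_onsets visual_2_onsets stable_odour_1_onsets stable_odour_2_onsets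
instance (visual_1_onsets : List Int) (visual_2_onsets : List Int) (stable_odour_1_onsets : List Int) (stable_odour_2_onsets : List Int) (out : List Int × List Int) : Decidable (Spec_get_visual_onsets_in_stable_odour_trials visual_1_onsets visual_2_onsets stable_odour_1_onsets stable_odour_2_onsets out) := by unfold Spec_get_visual_onsets_in_stable_odour_trials; infer_instance

-- ===== CLAIM (what is proved, stated in full; the proofs are below) =====
def Claim_equal_get_visual_onsets_in_stable_odour_trials : Prop := ∀ (visual_1_onsets : List Int) (visual_2_onsets : List Int) (stable_odour_1_onsets : List Int) (stable_odour_2_onsets : List Int), Dom_get_visual_onsets_in_stable_odour_trials visual_1_onsets visual_2_onsets stable_odour_1_onsets stable_odour_2_onsets → Spec_get_visual_onsets_in_stable_odour_trials visual_1_onsets visual_2_onsets stable_odour_1_onsets stable_odour_2_onsets (get_visual_onsets_in_stable_odour_trials visual_1_onsets visual_2_onsets stable_odour_1_onsets stable_odour_2_onsets)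

-- ===== LEMMAS AND PROOFS =====

-- a predicate that holds exactly on the first k positions of a list is counted k times
lemma countP_of_prefix (l : List Int) (p : Int → Bool) (k : Nat) (hk : k ≤ l.length)
    (h : ∀ j (hj : j < l.length), p l[j] = decide (j < k)) : l.countP p = k := by
  induction l generalizing k with
  | nil =>
    simp only [List.length_nil, Nat.le_zero] at hk
    simp [hk]
  | cons a t ih =>
    cases k with
    | zero =>
      have ha : p a = false := by simpa using h 0 (by simp)
      have ht : t.countP p = 0 := by
        apply ih 0 (by omega)
        intro j hj
        simpa using h (j + 1) (by simpa using Nat.succ_lt_succ hj)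
      simp [ha, ht]
    | succ k' =>
      have ha : p a = true := by simpa using h 0 (by simp)
      have ht : t.countP p = k' := by
        apply ih k' (by simpa using hk)
        intro j hj
        have := h (j + 1) (by simpa using Nat.succ_lt_succ hj)
        simpa [Nat.succ_lt_succ_iff] using this
      simp [ha, ht]

-- bisect_right on a sorted list counts the elements ≤ x
lemma bisectRight_eq_countP (xs : List Int) (x : Int)
    (hs : List.Pairwise (fun a b => a ≤ b) xs) :
    PySem.List.bisectRight xs x = xs.countP (fun o => decide (o ≤ x)) := by
  obtain ⟨hle, hlt, hgt⟩ := PySem.List.bisectRight_spec xs x hs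
  refine (countP_of_prefix xs _ _ hle ?_).symm
  intro j hj
  by_cases hcase : j < PySem.List.bisectRight xs x
  · simp [hlt j hj hcase, hcase]
  · have := hgt j hj (by omega)
    simp [hcase]
    omega

-- counting elements ≤ w splits at v ≤ w
lemma countP_split (v w : Int) (hvw : v ≤ w) (l : List Int) :
    l.countP (fun o => decide (o ≤ w))
      = l.countP (fun o => decide (o ≤ v)) + l.countP (fun o => decide (v < o) && decide (o ≤ w)) := by
  induction l with
  | nil => simp
  | cons a t ih =>
    simp only [List.countP_cons, ih]
    by_cases h1 : a ≤ v <;> by_cases h2 : a ≤ w <;> by_cases h3 : v < a <;>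
      simp [h1, h2, h3] <;> omega

-- A's inner loop appends the visual onset once per odour onset in the window
lemma innerA_eq_replicate (v : Int) (l acc : List Int) :
    l.foldl (fun acc2 o => if o > v ∧ o ≤ v + 5000 then acc2 ++ [v] else acc2) acc
      = acc ++ List.replicate (l.countP (fun o => decide (v < o) && decide (o ≤ v + 5000))) v := by
  induction l generalizing acc with
  | nil => simp
  | cons a t ih =>
    by_cases h : v < a ∧ a ≤ v + 5000
    · rw [List.foldl_cons, if_pos (by exact ⟨h.1, h.2⟩), ih]
      have hc : List.countP (fun o => decide (v < o) && decide (o ≤ v + 5000)) (a :: t)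
          = List.countP (fun o => decide (v < o) && decide (o ≤ v + 5000)) t + 1 := by
        simp [h.1, h.2]
      rw [hc, List.replicate_succ', List.append_assoc, List.singleton_append,
        ← List.replicate_succ, List.replicate_succ']
    · rw [List.foldl_cons, if_neg (by exact fun hx => h ⟨hx.1, hx.2⟩), ih]
      have hc : List.countP (fun o => decide (v < o) && decide (o ≤ v + 5000)) (a :: t)
          = List.countP (fun o => decide (v < o) && decide (o ≤ v + 5000)) t := by
        rcases not_and_or.mp h with h' | h' <;> simp [h']
      rw [hc]

-- for every visual onset, B's bisect difference is A's window count
lemma count_eq_bisect_diff (o1 o2 : List Int) (v : Int) :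
    (o1 ++ o2).countP (fun o => decide (v < o) && decide (o ≤ v + 5000))
      = PySem.List.bisectRight (PySem.List.sorted (o1 ++ o2) (fun x => x)) (v + 5000)
        - PySem.List.bisectRight (PySem.List.sorted (o1 ++ o2) (fun x => x)) v := by
  set s := PySem.List.sorted (o1 ++ o2) (fun x => x) with hsdef
  have hperm : s.Perm (o1 ++ o2) := PySem.List.sorted_perm _ _ _
  have hs : List.Pairwise (fun a b : Int => a ≤ b) s := PySem.List.sorted_pairwise _ _
  have hsplit := countP_split v (v + 5000) (by omega) s
  rw [← hperm.countP_eq, bisectRight_eq_countP s (v + 5000) hs, bisectRight_eq_countP s v hs]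
  omega

-- the two outer folds agree
lemma select_eq (o1 o2 : List Int) (vs acc : List Int) :
    vs.foldl (fun acc v =>
        (o1 ++ o2).foldl (fun acc2 o => if o > v ∧ o ≤ v + 5000 then acc2 ++ [v] else acc2) acc) acc
      = vs.foldl (fun selected v =>
          selected ++ List.replicate
            (PySem.List.bisectRight (PySem.List.sorted (o1 ++ o2) (fun x => x)) (v + 5000)
              - PySem.List.bisectRight (PySem.List.sorted (o1 ++ o2) (fun x => x)) v) v) acc := by
  induction vs generalizing acc with
  | nil => rfl
  | cons v t ih =>
    simp only [List.foldl_cons]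
    rw [innerA_eq_replicate, count_eq_bisect_diff o1 o2 v, ih]

-- ===== VERDICT (by name: the statement is the Claim_ definition above) =====
theorem get_visual_onsets_in_stable_odour_trials_spec : Claim_equal_get_visual_onsets_in_stable_odour_trials := by
  intro v1 v2 o1 o2 _
  show _ = _
  unfold get_visual_onsets_in_stable_odour_trials get_visual_onsets_in_stable_odour_trials_alt pvSelect
  refine Prod.ext ?_ ?_
  · exact select_eq o1 o2 v1 []
  · exact select_eq o1 o2 v2 []
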